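-- pv_equiv track=rewrite | github.com/david-poirier-csn/aioaws | tests/test_signer_against_aws_test_suite.py | _parse_txt_req
-- ===== SOURCE A (Python) =====
-- def _parse_txt_req(txt_req):
--     lines = txt_req.split('\n')
--     head = lines[0].split(' ')
--     method = head[0]
--     url = ' '.join(head[1:len(head)-1])
--     version = head[-1]
--
--     headers = {}
--     i = 1
--     while i < len(lines):
--         line = lines[i]
--         if line=='':
--             break
--         sep = line.find(':')
--         k = line[:sep].strip()
--         v = line[sep+1:].strip()
--
--         while i+1 < len(lines):
--             next_line = lines[i+1]
--             if next_line.startswith(' ') or next_line.startswith('\t'):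
--                 v += ',' + next_line.strip()
--             else:
--                 break
--             i += 1
--
--         if k in headers:
--             headers[k] += ',' + v
--         else:
--             headers[k] = v
--         i += 1
--
--     body = ''
--     while i < len(lines):
--         if body != '':
--             body += '\r\n'
--         body += lines[i]
--         i += 1
--
--     return method, url, version, headers, body
-- ===== SOURCE B (Python) =====
-- def _parse_txt_req(txt_req):
--     lines = txt_req.split('\n')
--     head = lines[0].split(' ')
--     method = head[0]
--     url = ' '.join(head[1:len(head) - 1])
--     version = head[-1]
--
--     # split into header section and body section at the first blank line
--     try:
--         blank = lines.index('', 1)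
--     except ValueError:
--         blank = len(lines)
--     header_lines = lines[1:blank]
--     body_lines = lines[blank:]
--
--     # one pass: parse each header line, folding continuation lines into the last value
--     pairs = []
--     for line in header_lines:
--         if pairs and (line.startswith(' ') or line.startswith('\t')):
--             pairs[-1][1] += ',' + line.strip()
--         else:
--             sep = line.find(':')
--             pairs.append([line[:sep].strip(), line[sep + 1:].strip()])
--
--     headers = {}
--     for k, v in pairs:
--         headers[k] = headers[k] + ',' + v if k in headers else v
--
--     # body: leading empty lines (incl. the blank delimiter) vanish, rest joined by CRLF
--     j = 0
--     while j < len(body_lines) and body_lines[j] == '':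
--         j += 1
--     body = '\r\n'.join(body_lines[j:])
--
--     return method, url, version, headers, body
-- ===== Notes on version B (the rewrite author's own statement) =====
-- stated objective: simpler
-- what changed: A's single index-driven while loop with a nested continuation while and interleaved body loop is replaced by separate passes: split the lines at the first blank line, one flat fold over the header lines that merges continuation lines into the last parsed pair, a dict fold merging duplicate keys, and a CRLF join of the body after dropping leading empty lines.
import Mathlib
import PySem

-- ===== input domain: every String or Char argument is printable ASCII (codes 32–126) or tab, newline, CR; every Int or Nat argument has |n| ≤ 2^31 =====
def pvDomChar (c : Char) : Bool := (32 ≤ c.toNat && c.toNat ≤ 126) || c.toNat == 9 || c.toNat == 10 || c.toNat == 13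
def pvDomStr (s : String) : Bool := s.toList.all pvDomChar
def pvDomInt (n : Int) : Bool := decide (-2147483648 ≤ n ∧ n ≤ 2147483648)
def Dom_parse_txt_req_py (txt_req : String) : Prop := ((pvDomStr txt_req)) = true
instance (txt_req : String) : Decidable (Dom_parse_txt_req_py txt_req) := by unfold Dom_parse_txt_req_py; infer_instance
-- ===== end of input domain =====

-- B replaces A's single index-driven while loop (with a nested continuation loop) by separate
-- passes: split at the first blank line, one flat fold over the header lines, then a dict fold
-- and a CRLF join of the body; objective: simpler decomposition, same values.

-- ===== PORT A =====
-- A's inner 'while i+1 < len(lines)' continuation loop: consumes following lines that start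
-- with ' ' or '\t', returning the grown value and the remaining lines (index i ↦ remaining suffix).
def pvA_cont : List String → String → String × List String
  | [], v => (v, [])
  | next_line :: rest, v =>
    if PySem.Str.startswith next_line " " || PySem.Str.startswith next_line "\t" then
      pvA_cont rest (v ++ "," ++ PySem.Str.strip next_line)
    else (v, next_line :: rest)

-- needed by pvA_hdrs's termination proof
lemma pvA_cont_length_le : ∀ (rest : List String) (v : String),
    (pvA_cont rest v).2.length ≤ rest.length := by
  intro rest
  induction rest with
  | nil => intro v; simp [pvA_cont]
  | cons x xs ih =>
    intro v
    simp only [pvA_cont]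
    split
    · exact le_trans (ih _) (Nat.le_succ _)
    · simp

-- A's outer header while loop: stops at the first '' line, returns the dict and the remaining lines.
def pvA_hdrs : List String → PySem.Dict String String → PySem.Dict String String × List String
  | [], headers => (headers, [])
  | line :: rest, headers =>
    if line == "" then (headers, line :: rest)
    else
      let sep := PySem.Str.find line ":"
      let k := PySem.Str.strip (PySem.Str.slice line none (some sep))
      let v0 := PySem.Str.strip (PySem.Str.slice line (some (sep + 1)) none)
      let r := pvA_cont rest v0
      let headers' := if headers.contains k then
          headers.insert k (((headers.get? k).getD "") ++ "," ++ r.1)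
        else headers.insert k r.1
      pvA_hdrs r.2 headers'
termination_by l _ => l.length
decreasing_by
  exact Nat.lt_succ_of_le (pvA_cont_length_le rest v0)

-- A's body while loop (separator skipped while body is still '').
def pvA_body : List String → String → String
  | [], body => body
  | l :: rest, body => pvA_body rest ((if body ≠ "" then body ++ "\r\n" else body) ++ l)

def parse_txt_req_py (txt_req : String) : String × String × String × (List (String × String)) × String :=
  let lines := (PySem.Str.split? txt_req "\n").getD []      -- sep "\n" ≠ "": split? is always some
  let head := (PySem.Str.split? (lines.headD "") " ").getD []   -- lines[0]: split? never returns []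
  let method := head.headD ""                               -- head[0]: head is nonempty
  let url := PySem.Str.join " " (PySem.List.slice head (some 1) (some (PySem.List.len head - 1)))
  let version := PySem.List.pyGetD head (-1) ""             -- head[-1]: head is nonempty
  let r := pvA_hdrs (lines.drop 1) PySem.Dict.empty         -- the while loop from i = 1
  (method, url, version, r.1.items, pvA_body r.2 "")

-- ===== PORT B =====
-- one step of B's flat pass over the header lines: a continuation line is folded into the
-- last pair (pairs[-1]), anything else is parsed at its first ':' and appended.
def pvB_step (pairs : List (String × String)) (line : String) : List (String × String) :=
  if !pairs.isEmpty && (PySem.Str.startswith line " " || PySem.Str.startswith line "\t") then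
    let p := PySem.List.pyGetD pairs (-1) ("", "")
    pairs.dropLast ++ [(p.1, p.2 ++ "," ++ PySem.Str.strip line)]
  else
    let sep := PySem.Str.find line ":"
    pairs ++ [(PySem.Str.strip (PySem.Str.slice line none (some sep)),
               PySem.Str.strip (PySem.Str.slice line (some (sep + 1)) none))]

-- B's dict pass: merge a duplicate key with ','.
def pvB_addHeader (headers : PySem.Dict String String) (p : String × String) :
    PySem.Dict String String :=
  if headers.contains p.1 then headers.insert p.1 (((headers.get? p.1).getD "") ++ "," ++ p.2)
  else headers.insert p.1 p.2

def parse_txt_req_py_alt (txt_req : String) : String × String × String × (List (String × String)) × String :=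
  let lines := (PySem.Str.split? txt_req "\n").getD []      -- sep "\n" ≠ "": split? is always some
  let head := (PySem.Str.split? (lines.headD "") " ").getD []   -- lines[0]: split? never returns []
  let method := head.headD ""
  let url := PySem.Str.join " " (PySem.List.slice head (some 1) (some (PySem.List.len head - 1)))
  let version := PySem.List.pyGetD head (-1) ""
  let rest := lines.drop 1                                  -- lines[1:]
  let blank := match PySem.List.index? rest "" with         -- rest.index('') / ValueError branch
    | some n => n
    | none => rest.length
  let headerLines := rest.take blank                        -- rest[:blank] (0 ≤ blank)
  let bodyLines := rest.drop blank                          -- rest[blank:]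
  let pairs := headerLines.foldl pvB_step []
  let headers := pairs.foldl pvB_addHeader PySem.Dict.empty
  let body := PySem.Str.join "\r\n" (bodyLines.dropWhile (· == ""))  -- leading '' lines skipped
  (method, url, version, headers.items, body)

-- ===== PRECONDITION & SPEC =====
def Spec_parse_txt_req_py (txt_req : String) (out : String × String × String × (List (String × String)) × String) : Prop := out = parse_txt_req_py_alt txt_req
instance (txt_req : String) (out : String × String × String × (List (String × String)) × String) : Decidable (Spec_parse_txt_req_py txt_req out) := by unfold Spec_parse_txt_req_py; infer_instance

-- ===== CLAIM (what is proved, stated in full; the proofs are below) =====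
def Claim_equal_parse_txt_req_py : Prop := ∀ (txt_req : String), Dom_parse_txt_req_py txt_req → Spec_parse_txt_req_py txt_req (parse_txt_req_py txt_req)

-- ===== LEMMAS AND PROOFS =====

-- B's take/drop at the index of the first '' is the takeWhile/dropWhile split
lemma pv_split_at_blank : ∀ (rest : List String),
    rest.take (match PySem.List.index? rest "" with | some n => n | none => rest.length)
      = rest.takeWhile (fun l => !(l == "")) ∧
    rest.drop (match PySem.List.index? rest "" with | some n => n | none => rest.length)
      = rest.dropWhile (fun l => !(l == "")) := by
  intro rest
  induction rest with
  | nil => simp [PySem.List.index?]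
  | cons x xs ih =>
    by_cases hx : x = ""
    · subst hx
      rw [PySem.List.index?_cons_self]
      simp
    · rw [PySem.List.index?_cons_of_ne xs hx]
      cases h : PySem.List.index? xs "" with
      | some n =>
        rw [h] at ih
        simp [hx, ih.1, ih.2]
      | none =>
        rw [h] at ih
        simp [hx, ih.1, ih.2]

lemma pv_dropWhile_head? {α : Type} (p : α → Bool) : ∀ (l : List α) (x : α),
    (l.dropWhile p).head? = some x → p x = false := by
  intro l
  induction l with
  | nil => intro x h; simp [List.dropWhile] at h
  | cons y ys ih =>
    intro x h
    rw [List.dropWhile_cons] at h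
    by_cases hy : p y = true
    · rw [if_pos hy] at h
      exact ih x h
    · rw [if_neg hy] at h
      simp only [List.head?_cons, Option.some.injEq] at h
      subst h
      simpa using hy

-- an empty line is not a continuation line
lemma pv_blank_not_cont :
    (PySem.Str.startswith "" " " || PySem.Str.startswith "" "\t") = false := by
  decide

-- A's continuation loop across a block of continuation lines
lemma pv_contA : ∀ (conts tail : List String) (v : String),
    (∀ c ∈ conts, (PySem.Str.startswith c " " || PySem.Str.startswith c "\t") = true) →
    (∀ x, tail.head? = some x →
        (PySem.Str.startswith x " " || PySem.Str.startswith x "\t") = false) →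
    pvA_cont (conts ++ tail) v
      = (conts.foldl (fun v c => v ++ "," ++ PySem.Str.strip c) v, tail) := by
  intro conts
  induction conts with
  | nil =>
    intro tail v _ htail
    cases tail with
    | nil => simp [pvA_cont]
    | cons t ts =>
      have := htail t rfl
      simp only [List.nil_append, List.foldl_nil, pvA_cont]
      rw [if_neg (by rw [this]; simp)]
  | cons c cs ih =>
    intro tail v hc htail
    have hc0 := hc c (List.mem_cons_self ..)
    simp only [List.cons_append, pvA_cont, hc0, if_pos, List.foldl_cons]
    exact ih tail _ (fun d hd => hc d (List.mem_cons_of_mem _ hd)) htail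

-- B's flat pass across the same block of continuation lines updates the last pair
lemma pv_contB' : ∀ (conts : List String) (acc : List (String × String)) (k v : String),
    (∀ c ∈ conts, (PySem.Str.startswith c " " || PySem.Str.startswith c "\t") = true) →
    List.foldl pvB_step (acc ++ [(k, v)]) conts
      = acc ++ [(k, conts.foldl (fun v c => v ++ "," ++ PySem.Str.strip c) v)] := by
  intro conts
  induction conts with
  | nil => intro acc k v _; simp
  | cons c cs ih =>
    intro acc k v hc
    have hc0 := hc c (List.mem_cons_self ..)
    have hstep : pvB_step (acc ++ [(k, v)]) c
        = acc ++ [(k, v ++ "," ++ PySem.Str.strip c)] := by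
      unfold pvB_step
      rw [if_pos (by simp at hc0 ⊢; exact hc0)]
      simp [PySem.List.pyGetD_neg_one_append_singleton]
    rw [List.foldl_cons, hstep, List.foldl_cons]
    exact ih acc k _ (fun d hd => hc d (List.mem_cons_of_mem _ hd))

-- the key/value a header line is parsed into (shared shape of both ports' parsing step)
def pvKV (line : String) : String × String :=
  (PySem.Str.strip (PySem.Str.slice line none (some (PySem.Str.find line ":"))),
   PySem.Str.strip (PySem.Str.slice line (some (PySem.Str.find line ":" + 1)) none))

-- one unfolding of A's header loop on a non-blank line
lemma pvA_hdrs_cons (h : String) (rest : List String) (hs : PySem.Dict String String)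
    (hne : (h == "") = false) :
    pvA_hdrs (h :: rest) hs
      = pvA_hdrs (pvA_cont rest (pvKV h).2).2
          (pvB_addHeader hs ((pvKV h).1, (pvA_cont rest (pvKV h).2).1)) := by
  rw [pvA_hdrs]
  rw [if_neg (by simp [hne])]
  rfl

-- B's step on a line that is not folded as a continuation
lemma pvB_step_header (acc : List (String × String)) (line : String)
    (hcond : (!acc.isEmpty && (PySem.Str.startswith line " " || PySem.Str.startswith line "\t"))
      = false) :
    pvB_step acc line = acc ++ [pvKV line] := by
  unfold pvB_step
  rw [if_neg (by simp only [hcond]; simp)]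
  rfl

-- the main loop correspondence: A's interleaved header loop over hl ++ tail equals B's
-- flat pass over hl followed by the dict fold, leaving tail for the body
lemma pv_main : ∀ (n : Nat) (hl tail : List String) (acc : List (String × String))
    (d0 : PySem.Dict String String),
    hl.length ≤ n →
    (∀ l ∈ hl, l ≠ "") →
    (∀ x, tail.head? = some x → x = "") →
    (acc = [] ∨ ∀ x, hl.head? = some x →
        (PySem.Str.startswith x " " || PySem.Str.startswith x "\t") = false) →
    pvA_hdrs (hl ++ tail) (acc.foldl pvB_addHeader d0)
      = ((hl.foldl pvB_step acc).foldl pvB_addHeader d0, tail) := by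
  intro n
  induction n with
  | zero =>
    intro hl tail acc d0 hn hne htail _
    have : hl = [] := List.length_eq_zero_iff.mp (Nat.le_zero.mp hn)
    subst this
    cases tail with
    | nil => simp [pvA_hdrs]
    | cons t ts =>
      have ht : t = "" := htail t rfl
      subst ht
      simp [pvA_hdrs]
  | succ m ih =>
    intro hl tail acc d0 hn hne htail hinv
    cases hl with
    | nil =>
      cases tail with
      | nil => simp [pvA_hdrs]
      | cons t ts =>
        have ht : t = "" := htail t rfl
        subst ht
        simp [pvA_hdrs]
    | cons h hrest =>
      have hh : h ≠ "" := hne h (List.mem_cons_self ..)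
      have hhb : (h == "") = false := by simpa using hh
      -- split hrest into the continuation block and the rest
      have hsplit : hrest
          = hrest.takeWhile (fun l => PySem.Str.startswith l " " || PySem.Str.startswith l "\t")
            ++ hrest.dropWhile (fun l => PySem.Str.startswith l " " || PySem.Str.startswith l "\t") :=
        (List.takeWhile_append_dropWhile).symm
      set conts := hrest.takeWhile
        (fun l => PySem.Str.startswith l " " || PySem.Str.startswith l "\t") with hconts
      set hl' := hrest.dropWhile
        (fun l => PySem.Str.startswith l " " || PySem.Str.startswith l "\t") with hhl'
      have hcont_mem : ∀ c ∈ conts,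
          (PySem.Str.startswith c " " || PySem.Str.startswith c "\t") = true := by
        intro c hc
        rw [hconts] at hc
        simpa using List.mem_takeWhile_imp hc
      have hhl'_head : ∀ x, (hl' ++ tail).head? = some x →
          (PySem.Str.startswith x " " || PySem.Str.startswith x "\t") = false := by
        intro x hx
        cases hl'eq : hl' with
        | nil =>
          rw [hl'eq] at hx
          simp only [List.nil_append] at hx
          have := htail x hx
          subst this
          exact pv_blank_not_cont
        | cons y ys =>
          rw [hl'eq] at hx
          simp only [List.cons_append, List.head?_cons, Option.some.injEq] at hx
          subst hx
          simpa using pv_dropWhile_head?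
            (fun l => PySem.Str.startswith l " " || PySem.Str.startswith l "\t") hrest y
            (by rw [← hhl', hl'eq]; rfl)
      have hrw : hrest ++ tail = conts ++ (hl' ++ tail) := by
        rw [← List.append_assoc, ← hsplit]
      have hcontA := pv_contA conts (hl' ++ tail) (pvKV h).2 hcont_mem hhl'_head
      -- one step of A
      rw [List.cons_append, pvA_hdrs_cons h (hrest ++ tail) _ hhb, hrw, hcontA]
      have hdict : pvB_addHeader (acc.foldl pvB_addHeader d0)
            ((pvKV h).1,
              conts.foldl (fun v c => v ++ "," ++ PySem.Str.strip c) (pvKV h).2)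
          = (acc ++ [((pvKV h).1,
              conts.foldl (fun v c => v ++ "," ++ PySem.Str.strip c) (pvKV h).2)]).foldl
              pvB_addHeader d0 := by
        rw [List.foldl_append]
        rfl
      rw [hdict]
      -- lengths and side conditions for the induction hypothesis
      have hlen : hl'.length ≤ m := by
        have h1 : hl'.length ≤ hrest.length := by
          rw [hhl']; exact (List.dropWhile_sublist _).length_le
        have h2 : hrest.length + 1 ≤ m + 1 := by simpa using hn
        omega
      have hne' : ∀ l ∈ hl', l ≠ "" := by
        intro l hml
        exact hne l (List.mem_cons_of_mem _ ((List.dropWhile_sublist _).mem hml))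
      have hinv' : (acc ++ [((pvKV h).1,
            conts.foldl (fun v c => v ++ "," ++ PySem.Str.strip c) (pvKV h).2)] = [])
          ∨ ∀ x, hl'.head? = some x →
              (PySem.Str.startswith x " " || PySem.Str.startswith x "\t") = false := by
        right
        intro x hx
        simpa using pv_dropWhile_head?
          (fun l => PySem.Str.startswith l " " || PySem.Str.startswith l "\t") hrest x
          (by rw [← hhl']; exact hx)
      rw [ih hl' tail _ d0 hlen hne' htail hinv']
      -- B's side: fold over h :: (conts ++ hl')
      have hstepB : pvB_step acc h = acc ++ [pvKV h] := by
        refine pvB_step_header acc h ?_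
        rcases hinv with hacc | hhead
        · subst hacc
          simp
        · have hx := hhead h rfl
          simp at hx
          simp [hx.1, hx.2]
      rw [hsplit, List.foldl_cons, hstepB, List.foldl_append]
      rw [show acc ++ [pvKV h] = acc ++ [((pvKV h).1, (pvKV h).2)] from rfl,
        pv_contB' conts acc (pvKV h).1 (pvKV h).2 hcont_mem]

-- join over a merged first element
lemma pv_join_merge (sep a b : List Char) : ∀ (l : List (List Char)),
    PySem.Chars.join sep ((a ++ sep ++ b) :: l) = a ++ sep ++ PySem.Chars.join sep (b :: l) := by
  intro l
  cases l with
  | nil => simp [PySem.Chars.join_singleton]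
  | cons c cs =>
    rw [PySem.Chars.join_cons_cons, PySem.Chars.join_cons_cons]
    simp [List.append_assoc]

-- A's body loop from a nonempty accumulator is the CRLF join
lemma pv_bodyA2 : ∀ (xs : List String) (x : String), x ≠ "" →
    pvA_body xs x = PySem.Str.join "\r\n" (x :: xs) := by
  intro xs
  induction xs with
  | nil =>
    intro x _
    apply String.toList_inj.mp
    rw [PySem.Str.toList_join]
    simp [PySem.Chars.join_singleton, pvA_body]
  | cons y ys ih =>
    intro x hx
    have hstep : pvA_body (y :: ys) x = pvA_body ys ((x ++ "\r\n") ++ y) := by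
      simp [pvA_body, hx]
    rw [hstep]
    have hne : (x ++ "\r\n") ++ y ≠ "" := by
      intro h
      have := congrArg String.toList h
      simp [String.toList_append] at this
    rw [ih _ hne]
    apply String.toList_inj.mp
    rw [PySem.Str.toList_join, PySem.Str.toList_join]
    simp only [List.map_cons, String.toList_append]
    rw [pv_join_merge, PySem.Chars.join_cons_cons]

-- A's whole body loop: leading empty lines vanish, the rest is a CRLF join
lemma pv_bodyA : ∀ (l : List String),
    pvA_body l "" = PySem.Str.join "\r\n" (l.dropWhile (· == "")) := by
  intro l
  induction l with
  | nil =>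
    apply String.toList_inj.mp
    rw [PySem.Str.toList_join]
    simp [PySem.Chars.join_nil, pvA_body]
  | cons x xs ih =>
    by_cases hx : x = ""
    · subst hx
      have : pvA_body ("" :: xs) "" = pvA_body xs "" := by simp [pvA_body]
      rw [this, ih]
      simp
    · have hstep : pvA_body (x :: xs) "" = pvA_body xs x := by simp [pvA_body]
      rw [hstep, pv_bodyA2 xs x hx]
      simp [hx]

-- takeWhile (!(· == "")) members are nonempty
lemma pv_takeWhile_ne (rest : List String) :
    ∀ l ∈ rest.takeWhile (fun l => !(l == "")), l ≠ "" := by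
  intro l hl
  have := List.mem_takeWhile_imp hl
  simpa using this

lemma pv_dropWhile_blank (rest : List String) :
    ∀ x, (rest.dropWhile (fun l => !(l == ""))).head? = some x → x = "" := by
  intro x hx
  have := pv_dropWhile_head? (fun l => !(l == "")) rest x hx
  simpa using this

-- ===== VERDICT (by name: the statement is the Claim_ definition above) =====
theorem parse_txt_req_py_spec : Claim_equal_parse_txt_req_py := by
  intro txt_req _
  unfold Spec_parse_txt_req_py
  simp only [parse_txt_req_py, parse_txt_req_py_alt]
  set lines := (PySem.Str.split? txt_req "\n").getD [] with hlines
  set rest := lines.drop 1 with hrest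
  obtain ⟨htake, hdrop⟩ := pv_split_at_blank rest
  rw [htake, hdrop]
  set hl := rest.takeWhile (fun l => !(l == "")) with hhl
  set tail := rest.dropWhile (fun l => !(l == "")) with htl
  have hmain := pv_main hl.length hl tail [] PySem.Dict.empty (Nat.le_refl _)
    (pv_takeWhile_ne rest) (pv_dropWhile_blank rest) (Or.inl rfl)
  simp only [List.foldl_nil] at hmain
  have hsplit : hl ++ tail = rest := List.takeWhile_append_dropWhile
  rw [hsplit] at hmain
  rw [hmain, pv_bodyA]
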